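-- pv_equiv track=rewrite | github.com/khawarcrc/daily_quest | 075_B_Minimum_Passes_Of_Matrix.py | convertNegatives
-- ===== SOURCE A (Python) =====
-- def convertNegatives(matrix):
--     """
--     Performs a BFS to convert negative values into positive values.
--     Uses a single queue to track cells to be processed.
--     """
--     queue = getAllPositivePositions(matrix)  # Initialize queue with all positive positions
--     passes = 0  # Initialize pass count
--
--     # Continue processing until no more cells to process
--     while len(queue) > 0:
--         currentSize = len(queue)  # Number of cells to process in the current pass
--         madeProgress = False  # Track if any changes are made during this pass
--
--         while currentSize > 0:
--             currentRow, currentCol = queue.pop(0)  # Dequeue the next cell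
--             # Get all valid adjacent positions
--             adjacentPositions = getAdjacentPositions(currentRow, currentCol, matrix)
--             for position in adjacentPositions:
--                 row, col = position
--                 value = matrix[row][col]
--                 if value < 0:
--                     # Convert negative to positive and enqueue the position
--                     matrix[row][col] *= -1
--                     queue.append([row, col])
--                     madeProgress = True
--             currentSize -= 1  # Decrement the count of cells to process in this pass
--
--         if madeProgress:
--             passes += 1  # Increment the pass count if changes occurred
--
--     return passes
--
-- def getAllPositivePositions(matrix):
--     """
--     Identifies all initial positive cell positions in the matrix.
--     Returns a list of coordinates of positive cells.
--     """
--     positivePositions = []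
--     for row in range(len(matrix)):
--         for col in range(len(matrix[row])):
--             value = matrix[row][col]
--             if value > 0:  # Add position to the list if value is positive
--                 positivePositions.append([row, col])
--     return positivePositions
--
-- def getAdjacentPositions(row, col, matrix):
--     """
--     Returns a list of valid adjacent cell positions for the given cell.
--     """
--     adjacentPositions = []
--     if row > 0:
--         adjacentPositions.append([row - 1, col])  # Top neighbor
--     if row < len(matrix) - 1:
--         adjacentPositions.append([row + 1, col])  # Bottom neighbor
--     if col > 0:
--         adjacentPositions.append([row, col - 1])  # Left neighbor
--     if col < len(matrix[0]) - 1: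
--         adjacentPositions.append([row, col + 1])  # Right neighbor
--     return adjacentPositions
-- ===== SOURCE B (Python) =====
-- def convertNegatives(matrix):
--     """
--     Counts passes by repeated whole-matrix scans: each pass collects every
--     negative cell with a strictly positive orthogonal neighbor (as of the
--     start of the pass), then flips them all at once.
--     Mutates matrix in place (same flips as the BFS version).
--     """
--     passes = 0
--     while True:
--         to_flip = [(r, c)
--                    for r, row in enumerate(matrix)
--                    for c, v in enumerate(row)
--                    if v < 0 and any(
--                        0 <= rr < len(matrix) and 0 <= cc < len(matrix[rr])
--                        and matrix[rr][cc] > 0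
--                        for rr, cc in ((r - 1, c), (r + 1, c), (r, c - 1), (r, c + 1)))]
--         if not to_flip:
--             return passes
--         for r, c in to_flip:
--             matrix[r][c] *= -1
--         passes += 1
-- ===== Notes on version B (the rewrite author's own statement) =====
-- stated objective: simpler
-- what changed: Replaced the BFS queue (seeded with all positive cells, per-level size counting, flips cascading into the queue) by a plain fixed-point loop: each pass rescans the whole matrix, collects every negative cell with a strictly positive orthogonal neighbor, flips them all at once, and counts passes until no cell qualifies.
-- outside the precondition, e.g. on convertNegatives([[1], [-1, -1]]): A returns 1, B returns 2; on convertNegatives([[1, 1], [-1]]): A raises IndexError, B returns 1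
import Mathlib
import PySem

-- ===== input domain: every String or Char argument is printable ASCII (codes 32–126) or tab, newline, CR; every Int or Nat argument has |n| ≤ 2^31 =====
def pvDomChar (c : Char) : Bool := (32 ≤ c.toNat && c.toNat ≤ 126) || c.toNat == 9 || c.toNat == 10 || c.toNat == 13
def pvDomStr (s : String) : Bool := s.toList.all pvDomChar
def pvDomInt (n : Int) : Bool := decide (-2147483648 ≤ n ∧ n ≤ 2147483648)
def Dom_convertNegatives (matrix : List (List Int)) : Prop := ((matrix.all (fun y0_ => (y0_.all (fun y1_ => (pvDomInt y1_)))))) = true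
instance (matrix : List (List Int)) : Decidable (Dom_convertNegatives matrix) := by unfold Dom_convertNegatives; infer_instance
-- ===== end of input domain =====

-- B replaces the BFS queue by repeated collect-then-flip whole-matrix scans (simpler: no frontier
-- bookkeeping); both versions mutate the Python matrix identically, the theorems are about the
-- returned pass count.

-- ===== PORT A =====
-- matrix[r][c]; A only reads cells at indices that are in range on rectangular input (Pre_),
-- where getD is exact.
def pvGetCell (m : List (List Int)) (r c : Nat) : Int := (m.getD r []).getD c 0

-- matrix[r][c] *= -1 (in-range on Pre_; List.set is a no-op out of range)
def pvFlipCell (m : List (List Int)) (r c : Nat) : List (List Int) :=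
  m.set r ((m.getD r []).set c (-(pvGetCell m r c)))

def pvGetAllPositivePositions (m : List (List Int)) : List (Nat × Nat) :=
  (List.range m.length).flatMap fun row =>
    (List.range (m.getD row []).length).filterMap fun col =>
      if 0 < pvGetCell m row col then some (row, col) else none

-- getAdjacentPositions; len(matrix[0]) is read as getD 0 [] (it is only reached with a
-- nonempty queue, hence nonempty matrix, where Python's matrix[0] succeeds)
def pvGetAdjacentPositions (row col : Nat) (m : List (List Int)) : List (Nat × Nat) :=
  (if 0 < row then [(row - 1, col)] else []) ++
  (if row + 1 < m.length then [(row + 1, col)] else []) ++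
  (if 0 < col then [(row, col - 1)] else []) ++
  (if col + 1 < (m.getD 0 []).length then [(row, col + 1)] else [])

-- body of "for position in adjacentPositions": state is (matrix, appended queue tail, madeProgress)
def pvAdjStep (st : List (List Int) × List (Nat × Nat) × Bool) (pos : Nat × Nat) :
    List (List Int) × List (Nat × Nat) × Bool :=
  if pvGetCell st.1 pos.1 pos.2 < 0 then (pvFlipCell st.1 pos.1 pos.2, st.2.1 ++ [pos], true)
  else st

-- one dequeued cell: visit its adjacent positions on the current matrix
def pvCellStep (st : List (List Int) × List (Nat × Nat) × Bool) (q : Nat × Nat) :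
    List (List Int) × List (Nat × Nat) × Bool :=
  (pvGetAdjacentPositions q.1 q.2 st.1).foldl pvAdjStep st

-- the inner "while currentSize > 0" pass: pops exactly the cells present at pass start
def pvPass (m : List (List Int)) (queue : List (Nat × Nat)) :
    List (List Int) × List (Nat × Nat) × Bool :=
  queue.foldl pvCellStep (m, ([] : List (Nat × Nat)), false)

-- fuel bound for the outer while (each flipping pass removes ≥ 1 negative cell)
def pvNegCount (m : List (List Int)) : Nat :=
  (m.map fun row => row.countP fun v => decide (v < 0)).sum

def pvALoop : Nat → List (List Int) → List (Nat × Nat) → Int → Int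
  | 0, _, _, passes => passes
  | fuel + 1, m, queue, passes =>
    if queue.isEmpty then passes
    else
      let st := pvPass m queue
      pvALoop fuel st.1 st.2.1 (if st.2.2 then passes + 1 else passes)

def convertNegatives (matrix : List (List Int)) : Int :=
  pvALoop (pvNegCount matrix + 2) matrix (pvGetAllPositivePositions matrix) 0

-- ===== PORT B =====
-- the guard "0 <= rr < len(matrix) and 0 <= cc < len(matrix[rr]) and matrix[rr][cc] > 0"
def pvNb (m : List (List Int)) (rr cc : Int) : Bool :=
  decide (0 ≤ rr) && decide (rr < (m.length : Int)) && decide (0 ≤ cc) &&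
  decide (cc < ((m.getD rr.toNat []).length : Int)) && decide (0 < pvGetCell m rr.toNat cc.toNat)

-- any(... for rr, cc in ((r-1,c),(r+1,c),(r,c-1),(r,c+1)))
def pvHasPosNeighbor (m : List (List Int)) (r c : Nat) : Bool :=
  pvNb m ((r : Int) - 1) c || pvNb m ((r : Int) + 1) c ||
  pvNb m r ((c : Int) - 1) || pvNb m r ((c : Int) + 1)

-- the to_flip comprehension
def pvCollect (m : List (List Int)) : List (Nat × Nat) :=
  (List.range m.length).flatMap fun r =>
    (List.range (m.getD r []).length).filterMap fun c =>
      if pvGetCell m r c < 0 ∧ pvHasPosNeighbor m r c = true then some (r, c) else none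

-- for r, c in to_flip: matrix[r][c] *= -1
def pvFlipAll (m : List (List Int)) (cells : List (Nat × Nat)) : List (List Int) :=
  cells.foldl (fun acc p => pvFlipCell acc p.1 p.2) m

def pvBLoop : Nat → List (List Int) → Int → Int
  | 0, _, passes => passes
  | fuel + 1, m, passes =>
    let toFlip := pvCollect m
    if toFlip.isEmpty then passes else pvBLoop fuel (pvFlipAll m toFlip) (passes + 1)

def convertNegatives_alt (matrix : List (List Int)) : Int :=
  pvBLoop (pvNegCount matrix + 1) matrix 0

-- ===== PRECONDITION & SPEC =====
-- Pre_ excludes ragged row lists (malformed input for a matrix routine): A sizes every row by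
-- len(matrix[0]) and indexes neighbor rows with it, which raises IndexError on some ragged
-- inputs and yields accidental results on others.
def Pre_convertNegatives (matrix : List (List Int)) : Prop :=
  ∀ row ∈ matrix, row.length = (matrix.getD 0 []).length

instance (matrix : List (List Int)) : Decidable (Pre_convertNegatives matrix) := by
  unfold Pre_convertNegatives; infer_instance

def pvWitness_convertNegatives : List (List Int) := [[1, -1], [0, -2]]

def Spec_convertNegatives (matrix : List (List Int)) (out : Int) : Prop :=
  out = convertNegatives_alt matrix
instance (matrix : List (List Int)) (out : Int) : Decidable (Spec_convertNegatives matrix out) := by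
  unfold Spec_convertNegatives; infer_instance

-- ===== CLAIM (what is proved, stated in full; the proofs are below) =====
def Claim_equal_convertNegatives : Prop := ∀ (matrix : List (List Int)),
  Dom_convertNegatives matrix → Pre_convertNegatives matrix →
  Spec_convertNegatives matrix (convertNegatives matrix)

-- ===== LEMMAS AND PROOFS =====

-- in-bounds cell
def pvInB (m : List (List Int)) (r c : Nat) : Prop :=
  r < m.length ∧ c < (m.getD r []).length

-- shadow of the mutation performed while visiting one adjacency list
def pvStepS (m : List (List Int)) (S : List (Nat × Nat)) (n : Nat × Nat) : List (Nat × Nat) :=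
  if pvGetCell (pvFlipAll m S) n.1 n.2 < 0 then S ++ [n] else S

-- the cells A flips during one pass over queue Q, in flip order
def pvPassS (m : List (List Int)) (Q : List (Nat × Nat)) : List (Nat × Nat) :=
  Q.foldl (fun S q => (pvGetAdjacentPositions q.1 q.2 m).foldl (pvStepS m) S) []

-- invariant on a flip list: distinct, in-bounds, negative cells
def pvMemInv (m : List (List Int)) (S : List (Nat × Nat)) : Prop :=
  S.Nodup ∧ ∀ p ∈ S, pvInB m p.1 p.2 ∧ pvGetCell m p.1 p.2 < 0

-- loop invariant: queue cells are in-bounds positive, and every negative cell with a positive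
-- neighbor has a neighbor in the queue
def pvInv (m : List (List Int)) (Q : List (Nat × Nat)) : Prop :=
  (∀ q ∈ Q, pvInB m q.1 q.2 ∧ 0 < pvGetCell m q.1 q.2) ∧
  (∀ r c, pvInB m r c → pvGetCell m r c < 0 →
    (∃ p ∈ pvGetAdjacentPositions r c m, 0 < pvGetCell m p.1 p.2) →
    ∃ q ∈ Q, q ∈ pvGetAdjacentPositions r c m)

-- ---- dimension lemmas ----
theorem pv_getD_set_self {α : Type} (l : List α) (i : Nat) (a d : α) (h : i < l.length) :
    (l.set i a).getD i d = a := by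
  rw [List.getD_eq_getElem?_getD, List.getElem?_set_self h]; rfl

theorem pv_getD_set_ne {α : Type} (l : List α) (i j : Nat) (a d : α) (h : i ≠ j) :
    (l.set i a).getD j d = l.getD j d := by
  rw [List.getD_eq_getElem?_getD, List.getElem?_set_ne h, ← List.getD_eq_getElem?_getD]

theorem pv_getD_out {α : Type} (l : List α) (i : Nat) (d : α) (h : l.length ≤ i) :
    l.getD i d = d := by
  rw [List.getD_eq_getElem?_getD, List.getElem?_eq_none h]; rfl

theorem pv_length_flip (m : List (List Int)) (r c : Nat) :
    (pvFlipCell m r c).length = m.length := by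
  simp [pvFlipCell]

theorem pv_rowlen_flip (m : List (List Int)) (r c i : Nat) :
    ((pvFlipCell m r c).getD i []).length = (m.getD i []).length := by
  unfold pvFlipCell
  by_cases h : r = i
  · subst h
    by_cases hl : r < m.length
    · rw [pv_getD_set_self _ _ _ _ hl, List.length_set]
    · rw [pv_getD_out _ _ _ (by simpa using Nat.le_of_not_lt hl),
        pv_getD_out _ _ _ (Nat.le_of_not_lt hl)]
  · rw [pv_getD_set_ne _ _ _ _ _ h]

theorem pv_length_flipAll (m : List (List Int)) (S : List (Nat × Nat)) :
    (pvFlipAll m S).length = m.length := by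
  induction S generalizing m with
  | nil => rfl
  | cons p S ih =>
    show (pvFlipAll (pvFlipCell m p.1 p.2) S).length = m.length
    rw [ih, pv_length_flip]

theorem pv_rowlen_flipAll (m : List (List Int)) (S : List (Nat × Nat)) (i : Nat) :
    ((pvFlipAll m S).getD i []).length = (m.getD i []).length := by
  induction S generalizing m with
  | nil => rfl
  | cons p S ih =>
    show ((pvFlipAll (pvFlipCell m p.1 p.2) S).getD i []).length = (m.getD i []).length
    rw [ih, pv_rowlen_flip]

theorem pv_adjL_flipAll (m : List (List Int)) (S : List (Nat × Nat)) (r c : Nat) :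
    pvGetAdjacentPositions r c (pvFlipAll m S) = pvGetAdjacentPositions r c m := by
  unfold pvGetAdjacentPositions
  rw [pv_length_flipAll, pv_rowlen_flipAll]

-- ---- pointwise flip lemmas ----
theorem pv_getCell_flip_self (m : List (List Int)) (r c : Nat)
    (hr : r < m.length) (hc : c < (m.getD r []).length) :
    pvGetCell (pvFlipCell m r c) r c = -(pvGetCell m r c) := by
  unfold pvFlipCell pvGetCell
  rw [pv_getD_set_self _ _ _ _ hr, pv_getD_set_self _ _ _ _ hc]

theorem pv_getCell_flip_ne (m : List (List Int)) (r c r' c' : Nat)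
    (h : ¬(r = r' ∧ c = c')) :
    pvGetCell (pvFlipCell m r c) r' c' = pvGetCell m r' c' := by
  unfold pvFlipCell pvGetCell
  by_cases hr : r = r'
  · subst hr
    have hcc : c ≠ c' := fun hcc => h ⟨rfl, hcc⟩
    by_cases hl : r < m.length
    · rw [pv_getD_set_self _ _ _ _ hl, pv_getD_set_ne _ _ _ _ _ hcc]
    · have e1 : (m.set r ((m.getD r []).set c (-(m.getD r []).getD c 0))).getD r [] = [] :=
        pv_getD_out _ _ _ (by simpa using Nat.le_of_not_lt hl)
      have e2 : m.getD r [] = [] := pv_getD_out _ _ _ (Nat.le_of_not_lt hl)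
      rw [e1, e2]
  · rw [pv_getD_set_ne _ _ _ _ _ hr]

theorem pv_getCell_flipAll (m : List (List Int)) (S : List (Nat × Nat)) (r c : Nat)
    (hnd : S.Nodup) (hin : ∀ p ∈ S, pvInB m p.1 p.2) :
    pvGetCell (pvFlipAll m S) r c =
      if (r, c) ∈ S then -(pvGetCell m r c) else pvGetCell m r c := by
  induction S generalizing m with
  | nil => simp [pvFlipAll]
  | cons p S ih =>
    obtain ⟨a, b⟩ := p
    obtain ⟨hp, hndS⟩ := List.nodup_cons.mp hnd
    have hinab : pvInB m a b := hin (a, b) List.mem_cons_self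
    have hinS : ∀ q ∈ S, pvInB (pvFlipCell m a b) q.1 q.2 := by
      intro q hq
      have := hin q (List.mem_cons_of_mem _ hq)
      unfold pvInB at this ⊢
      rwa [pv_length_flip, pv_rowlen_flip]
    show pvGetCell (pvFlipAll (pvFlipCell m a b) S) r c = _
    rw [ih (pvFlipCell m a b) hndS hinS]
    by_cases hS : (r, c) ∈ S
    · have hne : (r, c) ≠ (a, b) := fun h => hp (h ▸ hS)
      have hne' : ¬(a = r ∧ b = c) := fun ⟨h1, h2⟩ => hne (by simp [h1, h2])
      rw [pv_getCell_flip_ne m a b r c hne']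
      simp [hS, List.mem_cons.mpr (Or.inr hS)]
    · by_cases hpe : (r, c) = (a, b)
      · obtain ⟨h1, h2⟩ := Prod.mk.injEq .. ▸ hpe
        subst h1; subst h2
        rw [if_neg hS, pv_getCell_flip_self m r c hinab.1 hinab.2]
        simp
      · have hne' : ¬(a = r ∧ b = c) := fun ⟨h1, h2⟩ => hpe (by simp [h1, h2])
        rw [pv_getCell_flip_ne m a b r c hne']
        have : (r, c) ∉ (a, b) :: S := by
          intro h; rcases List.mem_cons.mp h with h | h
          · exact hpe h
          · exact hS h
        simp [hS, this]

-- ---- matrix extensionality ----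
theorem pv_mat_ext (m₁ m₂ : List (List Int))
    (hl : m₁.length = m₂.length)
    (hr : ∀ i, (m₁.getD i []).length = (m₂.getD i []).length)
    (hc : ∀ r c, pvGetCell m₁ r c = pvGetCell m₂ r c) : m₁ = m₂ := by
  apply List.ext_getElem hl
  intro i h1 h2
  have e1 : m₁.getD i [] = m₁[i] := List.getD_eq_getElem _ _ h1
  have e2 : m₂.getD i [] = m₂[i] := List.getD_eq_getElem _ _ h2
  apply List.ext_getElem
  · have := hr i; rwa [e1, e2] at this
  · intro j hj1 hj2
    have := hc i j
    unfold pvGetCell at this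
    rw [e1, e2, List.getD_eq_getElem _ _ hj1, List.getD_eq_getElem _ _ hj2] at this
    exact this

theorem pv_flipAll_set_eq (m : List (List Int)) (S T : List (Nat × Nat))
    (hS : pvMemInv m S) (hT : pvMemInv m T) (h : ∀ x, x ∈ S ↔ x ∈ T) :
    pvFlipAll m S = pvFlipAll m T := by
  apply pv_mat_ext
  · rw [pv_length_flipAll, pv_length_flipAll]
  · intro i; rw [pv_rowlen_flipAll, pv_rowlen_flipAll]
  · intro r c
    rw [pv_getCell_flipAll _ _ _ _ hS.1 (fun p hp => (hS.2 p hp).1),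
      pv_getCell_flipAll _ _ _ _ hT.1 (fun p hp => (hT.2 p hp).1)]
    by_cases hm : (r, c) ∈ S
    · rw [if_pos hm, if_pos ((h _).mp hm)]
    · rw [if_neg hm, if_neg (fun hc => hm ((h _).mpr hc))]

-- ---- membership characterizations ----
theorem pv_mem_adjL (m : List (List Int)) (r c a b : Nat) :
    (a, b) ∈ pvGetAdjacentPositions r c m ↔
      (0 < r ∧ a = r - 1 ∧ b = c) ∨ (r + 1 < m.length ∧ a = r + 1 ∧ b = c) ∨
      (0 < c ∧ a = r ∧ b = c - 1) ∨ (c + 1 < (m.getD 0 []).length ∧ a = r ∧ b = c + 1) := by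
  unfold pvGetAdjacentPositions
  simp only [List.mem_append, List.mem_ite_nil_right, List.mem_singleton, Prod.mk.injEq]
  tauto

theorem pv_adjL_InB (m : List (List Int)) (r c a b : Nat)
    (hrect : Pre_convertNegatives m) (hin : pvInB m r c)
    (h : (a, b) ∈ pvGetAdjacentPositions r c m) : pvInB m a b := by
  have hw : ∀ i, i < m.length → (m.getD i []).length = (m.getD 0 []).length := by
    intro i hi
    rw [List.getD_eq_getElem _ _ hi]
    exact hrect _ (List.getElem_mem hi)
  obtain ⟨hr, hc⟩ := hin
  have hcw : c < (m.getD 0 []).length := by rw [← hw r hr]; exact hc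
  rw [pv_mem_adjL] at h
  unfold pvInB
  rcases h with ⟨h0, rfl, rfl⟩ | ⟨h0, rfl, rfl⟩ | ⟨h0, rfl, rfl⟩ | ⟨h0, rfl, rfl⟩
  · exact ⟨by omega, by rw [hw _ (by omega)]; omega⟩
  · exact ⟨by omega, by rw [hw _ (by omega)]; omega⟩
  · exact ⟨by omega, by rw [hw _ (by omega)]; omega⟩
  · exact ⟨by omega, by rw [hw _ (by omega)]; omega⟩

theorem pv_adjL_symm (m : List (List Int)) (r c a b : Nat)
    (hrect : Pre_convertNegatives m) (h1 : pvInB m r c) (h2 : pvInB m a b) :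
    ((a, b) ∈ pvGetAdjacentPositions r c m ↔ (r, c) ∈ pvGetAdjacentPositions a b m) := by
  have hw : ∀ i, i < m.length → (m.getD i []).length = (m.getD 0 []).length := by
    intro i hi
    rw [List.getD_eq_getElem _ _ hi]
    exact hrect _ (List.getElem_mem hi)
  obtain ⟨hr1, hc1⟩ := h1
  obtain ⟨hr2, hc2⟩ := h2
  have hcw1 : c < (m.getD 0 []).length := by rw [← hw r hr1]; exact hc1
  have hcw2 : b < (m.getD 0 []).length := by rw [← hw a hr2]; exact hc2
  rw [pv_mem_adjL, pv_mem_adjL]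
  omega

theorem pv_mem_allPos (m : List (List Int)) (a b : Nat) :
    (a, b) ∈ pvGetAllPositivePositions m ↔ pvInB m a b ∧ 0 < pvGetCell m a b := by
  unfold pvGetAllPositivePositions pvInB
  simp only [List.mem_flatMap, List.mem_filterMap, List.mem_range,
    Option.ite_none_right_eq_some, Option.some.injEq, Prod.mk.injEq]
  constructor
  · rintro ⟨row, hrow, col, hcol, hpos, rfl, rfl⟩
    exact ⟨⟨hrow, hcol⟩, hpos⟩
  · rintro ⟨⟨ha, hb⟩, hpos⟩
    exact ⟨a, ha, b, hb, hpos, rfl, rfl⟩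

theorem pv_mem_collect (m : List (List Int)) (a b : Nat) :
    (a, b) ∈ pvCollect m ↔
      pvInB m a b ∧ pvGetCell m a b < 0 ∧ pvHasPosNeighbor m a b = true := by
  unfold pvCollect pvInB
  simp only [List.mem_flatMap, List.mem_filterMap, List.mem_range,
    Option.ite_none_right_eq_some, Option.some.injEq, Prod.mk.injEq]
  constructor
  · rintro ⟨row, hrow, col, hcol, ⟨hneg, hpn⟩, rfl, rfl⟩
    exact ⟨⟨hrow, hcol⟩, hneg, hpn⟩
  · rintro ⟨⟨ha, hb⟩, hneg, hpn⟩
    exact ⟨a, ha, b, hb, ⟨hneg, hpn⟩, rfl, rfl⟩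

theorem pv_collect_nodup (m : List (List Int)) : (pvCollect m).Nodup := by
  unfold pvCollect
  rw [List.nodup_flatMap]
  constructor
  · intro r _
    apply List.Nodup.filterMap _ List.nodup_range
    intro c c' p hc hc'
    simp only [Option.mem_def, Option.ite_none_right_eq_some, Option.some.injEq] at hc hc'
    have := hc.2.trans hc'.2.symm
    exact (Prod.mk.injEq .. ▸ this).2
  · have : (List.range m.length).Pairwise (· < ·) := List.pairwise_lt_range
    apply this.imp
    intro a b hab x hx hx'
    simp only [List.mem_filterMap, List.mem_range, Option.ite_none_right_eq_some,
      Option.some.injEq] at hx hx'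
    obtain ⟨c, _, _, rfl⟩ := hx
    obtain ⟨c', _, _, he⟩ := hx'
    have := (Prod.mk.injEq .. ▸ he).1
    omega

theorem pv_rect_rowlen (m : List (List Int)) (i : Nat)
    (hrect : Pre_convertNegatives m) (hi : i < m.length) :
    (m.getD i []).length = (m.getD 0 []).length := by
  rw [List.getD_eq_getElem _ _ hi]
  exact hrect _ (List.getElem_mem hi)

theorem pv_hasPos_char (m : List (List Int)) (r c : Nat)
    (hrect : Pre_convertNegatives m) (hin : pvInB m r c) :
    (pvHasPosNeighbor m r c = true ↔
      ∃ p ∈ pvGetAdjacentPositions r c m, 0 < pvGetCell m p.1 p.2) := by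
  obtain ⟨hr, hc⟩ := hin
  have hcw : c < (m.getD 0 []).length := by
    rw [← pv_rect_rowlen m r hrect hr]; exact hc
  unfold pvHasPosNeighbor pvNb
  simp only [Bool.or_eq_true, Bool.and_eq_true, decide_eq_true_eq]
  constructor
  · rintro (((h | h) | h) | h) <;> obtain ⟨⟨⟨⟨h1, h2⟩, h3⟩, h4⟩, h5⟩ := h
    · have e : ((r : Int) - 1).toNat = r - 1 := by omega
      rw [e, Int.toNat_natCast] at h5
      exact ⟨(r - 1, c), (pv_mem_adjL m r c _ _).mpr (Or.inl ⟨by omega, rfl, rfl⟩), h5⟩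
    · have e : ((r : Int) + 1).toNat = r + 1 := by omega
      rw [e, Int.toNat_natCast] at h5
      exact ⟨(r + 1, c), (pv_mem_adjL m r c _ _).mpr
        (Or.inr (Or.inl ⟨by omega, rfl, rfl⟩)), h5⟩
    · have e : ((c : Int) - 1).toNat = c - 1 := by omega
      rw [e, Int.toNat_natCast] at h5
      exact ⟨(r, c - 1), (pv_mem_adjL m r c _ _).mpr
        (Or.inr (Or.inr (Or.inl ⟨by omega, rfl, rfl⟩))), h5⟩
    · have e : ((c : Int) + 1).toNat = c + 1 := by omega
      rw [e, Int.toNat_natCast] at h5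
      have hlt : c + 1 < (m.getD 0 []).length := by
        rw [Int.toNat_natCast, pv_rect_rowlen m r hrect hr] at h4
        omega
      exact ⟨(r, c + 1), (pv_mem_adjL m r c _ _).mpr
        (Or.inr (Or.inr (Or.inr ⟨hlt, rfl, rfl⟩))), h5⟩
  · rintro ⟨⟨a, b⟩, hmem, hpos⟩
    rw [pv_mem_adjL] at hmem
    rcases hmem with ⟨h0, rfl, rfl⟩ | ⟨h0, rfl, rfl⟩ | ⟨h0, rfl, rfl⟩ | ⟨h0, rfl, rfl⟩
    · left; left; left
      have e : ((r : Int) - 1).toNat = r - 1 := by omega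
      simp only [Int.toNat_natCast, e]
      refine ⟨⟨⟨⟨by omega, by omega⟩, by omega⟩, ?_⟩, hpos⟩
      rw [pv_rect_rowlen m (r - 1) hrect (by omega)]; omega
    · left; left; right
      have e : ((r : Int) + 1).toNat = r + 1 := by omega
      simp only [Int.toNat_natCast, e]
      refine ⟨⟨⟨⟨by omega, by omega⟩, by omega⟩, ?_⟩, hpos⟩
      rw [pv_rect_rowlen m (r + 1) hrect (by omega)]; omega
    · left; right
      have e : ((c : Int) - 1).toNat = c - 1 := by omega
      simp only [Int.toNat_natCast, e]
      refine ⟨⟨⟨⟨by omega, by omega⟩, by omega⟩, ?_⟩, hpos⟩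
      rw [pv_rect_rowlen _ _ hrect hr]; omega
    · right
      have e : ((c : Int) + 1).toNat = c + 1 := by omega
      simp only [Int.toNat_natCast, e]
      refine ⟨⟨⟨⟨by omega, by omega⟩, by omega⟩, ?_⟩, hpos⟩
      rw [pv_rect_rowlen _ _ hrect hr]; omega

-- ---- the pass computes pvPassS ----
theorem pv_foldl_adjStep (m : List (List Int)) (ns : List (Nat × Nat)) (S : List (Nat × Nat)) :
    ns.foldl pvAdjStep (pvFlipAll m S, S, !S.isEmpty) =
      (pvFlipAll m (ns.foldl (pvStepS m) S), ns.foldl (pvStepS m) S,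
        !(ns.foldl (pvStepS m) S).isEmpty) := by
  induction ns generalizing S with
  | nil => rfl
  | cons n ns ih =>
    simp only [List.foldl_cons]
    have hstep : pvAdjStep (pvFlipAll m S, S, !S.isEmpty) n =
        (pvFlipAll m (pvStepS m S n), pvStepS m S n, !(pvStepS m S n).isEmpty) := by
      unfold pvAdjStep pvStepS
      dsimp only
      split_ifs with h
      · have hf : pvFlipAll m (S ++ [n]) = pvFlipCell (pvFlipAll m S) n.1 n.2 := by
          unfold pvFlipAll
          rw [List.foldl_append]
          rfl
        rw [hf]
        simp
      · rfl
    rw [hstep, ih]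

theorem pv_pass_eq (m : List (List Int)) (Q : List (Nat × Nat)) :
    pvPass m Q = (pvFlipAll m (pvPassS m Q), pvPassS m Q, !(pvPassS m Q).isEmpty) := by
  have aux : ∀ (Q S : List (Nat × Nat)),
      Q.foldl pvCellStep (pvFlipAll m S, S, !S.isEmpty) =
        (pvFlipAll m (Q.foldl (fun S q =>
            (pvGetAdjacentPositions q.1 q.2 m).foldl (pvStepS m) S) S),
          Q.foldl (fun S q => (pvGetAdjacentPositions q.1 q.2 m).foldl (pvStepS m) S) S,
          !(Q.foldl (fun S q =>
            (pvGetAdjacentPositions q.1 q.2 m).foldl (pvStepS m) S) S).isEmpty) := by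
    intro Q
    induction Q with
    | nil => intro S; rfl
    | cons q Q ih =>
      intro S
      simp only [List.foldl_cons]
      have hcell : pvCellStep (pvFlipAll m S, S, !S.isEmpty) q =
          (pvFlipAll m ((pvGetAdjacentPositions q.1 q.2 m).foldl (pvStepS m) S),
            (pvGetAdjacentPositions q.1 q.2 m).foldl (pvStepS m) S,
            !((pvGetAdjacentPositions q.1 q.2 m).foldl (pvStepS m) S).isEmpty) := by
        unfold pvCellStep
        dsimp only
        rw [pv_adjL_flipAll]
        exact pv_foldl_adjStep m _ S
      rw [hcell, ih]
  unfold pvPass pvPassS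
  have h0 : (m, ([] : List (Nat × Nat)), false) =
      (pvFlipAll m [], ([] : List (Nat × Nat)), !(([] : List (Nat × Nat)).isEmpty)) := rfl
  rw [h0, aux]

theorem pv_foldl_stepS_char (m : List (List Int)) (ns S : List (Nat × Nat))
    (hS : pvMemInv m S) (hns : ∀ n ∈ ns, pvInB m n.1 n.2) :
    pvMemInv m (ns.foldl (pvStepS m) S) ∧
      ∀ x, x ∈ ns.foldl (pvStepS m) S ↔
        (x ∈ S ∨ (pvGetCell m x.1 x.2 < 0 ∧ x ∈ ns)) := by
  induction ns generalizing S with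
  | nil => exact ⟨hS, fun x => by simp⟩
  | cons n ns ih =>
    obtain ⟨a, b⟩ := n
    have hn : pvInB m a b := hns (a, b) List.mem_cons_self
    have hstep : pvStepS m S (a, b) =
        if pvGetCell m a b < 0 ∧ (a, b) ∉ S then S ++ [(a, b)] else S := by
      unfold pvStepS
      dsimp only
      rw [pv_getCell_flipAll m S a b hS.1 (fun p hp => (hS.2 p hp).1)]
      by_cases hmem : (a, b) ∈ S
      · have hneg : pvGetCell m a b < 0 := (hS.2 _ hmem).2
        rw [if_pos hmem, if_neg (by omega), if_neg (by tauto)]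
      · rw [if_neg hmem]
        by_cases hng : pvGetCell m a b < 0
        · rw [if_pos hng, if_pos ⟨hng, hmem⟩]
        · rw [if_neg hng, if_neg (by tauto)]
    simp only [List.foldl_cons, hstep]
    by_cases hcond : pvGetCell m a b < 0 ∧ (a, b) ∉ S
    · rw [if_pos hcond]
      have hS' : pvMemInv m (S ++ [(a, b)]) := by
        constructor
        · rw [← List.concat_eq_append]
          exact List.Nodup.concat hcond.2 hS.1
        · intro p hp
          rcases List.mem_append.mp hp with hp | hp
          · exact hS.2 p hp
          · rw [List.mem_singleton.mp hp]
            exact ⟨hn, hcond.1⟩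
      obtain ⟨hinv', hiff⟩ := ih (S ++ [(a, b)]) hS'
        (fun x hx => hns x (List.mem_cons_of_mem _ hx))
      refine ⟨hinv', fun x => ?_⟩
      rw [hiff x]
      simp only [List.mem_append, List.mem_cons, List.not_mem_nil, or_false]
      constructor
      · rintro ((hx | rfl) | ⟨hneg, hx⟩)
        · exact Or.inl hx
        · exact Or.inr ⟨hcond.1, Or.inl rfl⟩
        · exact Or.inr ⟨hneg, Or.inr hx⟩
      · rintro (hx | ⟨hneg, rfl | hx⟩)
        · exact Or.inl (Or.inl hx)
        · exact Or.inl (Or.inr rfl)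
        · exact Or.inr ⟨hneg, hx⟩
    · rw [if_neg hcond]
      obtain ⟨hinv', hiff⟩ := ih S hS (fun x hx => hns x (List.mem_cons_of_mem _ hx))
      refine ⟨hinv', fun x => ?_⟩
      rw [hiff x]
      simp only [List.mem_cons]
      constructor
      · rintro (hx | ⟨hneg, hx⟩)
        · exact Or.inl hx
        · exact Or.inr ⟨hneg, Or.inr hx⟩
      · rintro (hx | ⟨hneg, rfl | hx⟩)
        · exact Or.inl hx
        · rcases Decidable.not_and_iff_not_or_not.mp hcond with h | h
          · exact absurd hneg h
          · exact Or.inl (Decidable.not_not.mp h)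
        · exact Or.inr ⟨hneg, hx⟩

theorem pv_passS_char (m : List (List Int)) (Q : List (Nat × Nat))
    (hrect : Pre_convertNegatives m) (hQ : ∀ q ∈ Q, pvInB m q.1 q.2) :
    pvMemInv m (pvPassS m Q) ∧
      ∀ x, x ∈ pvPassS m Q ↔
        (pvGetCell m x.1 x.2 < 0 ∧ ∃ q ∈ Q, x ∈ pvGetAdjacentPositions q.1 q.2 m) := by
  have aux : ∀ (Q' S : List (Nat × Nat)), pvMemInv m S → (∀ q ∈ Q', pvInB m q.1 q.2) →
      pvMemInv m (Q'.foldl (fun S q =>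
          (pvGetAdjacentPositions q.1 q.2 m).foldl (pvStepS m) S) S) ∧
        ∀ x, x ∈ Q'.foldl (fun S q =>
            (pvGetAdjacentPositions q.1 q.2 m).foldl (pvStepS m) S) S ↔
          (x ∈ S ∨ (pvGetCell m x.1 x.2 < 0 ∧
            ∃ q ∈ Q', x ∈ pvGetAdjacentPositions q.1 q.2 m)) := by
    intro Q'
    induction Q' with
    | nil => intro S hS _; exact ⟨hS, fun x => by simp⟩
    | cons q Q' ih =>
      intro S hS hQ'
      simp only [List.foldl_cons]
      have hq : pvInB m q.1 q.2 := hQ' q List.mem_cons_self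
      have hns : ∀ n ∈ pvGetAdjacentPositions q.1 q.2 m, pvInB m n.1 n.2 := by
        intro n hn
        obtain ⟨a, b⟩ := n
        exact pv_adjL_InB m q.1 q.2 a b hrect hq hn
      obtain ⟨hS1, hiff1⟩ := pv_foldl_stepS_char m _ S hS hns
      obtain ⟨hS2, hiff2⟩ := ih _ hS1 (fun p hp => hQ' p (List.mem_cons_of_mem _ hp))
      refine ⟨hS2, fun x => ?_⟩
      rw [hiff2 x, hiff1 x]
      constructor
      · rintro ((hx | ⟨hneg, hx⟩) | ⟨hneg, q', hq', hx⟩)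
        · exact Or.inl hx
        · exact Or.inr ⟨hneg, q, List.mem_cons_self, hx⟩
        · exact Or.inr ⟨hneg, q', List.mem_cons_of_mem _ hq', hx⟩
      · rintro (hx | ⟨hneg, q', hq', hx⟩)
        · exact Or.inl (Or.inl hx)
        · rcases List.mem_cons.mp hq' with rfl | hq'
          · exact Or.inl (Or.inr ⟨hneg, hx⟩)
          · exact Or.inr ⟨hneg, q', hq', hx⟩
  obtain ⟨h1, h2⟩ := aux Q [] ⟨List.nodup_nil, by simp⟩ hQ
  refine ⟨h1, fun x => ?_⟩
  rw [show pvPassS m Q = Q.foldl (fun S q =>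
    (pvGetAdjacentPositions q.1 q.2 m).foldl (pvStepS m) S) [] from rfl, h2 x]
  simp

theorem pv_passS_eq_collect (m : List (List Int)) (Q : List (Nat × Nat))
    (hrect : Pre_convertNegatives m) (hinv : pvInv m Q) :
    ∀ x, x ∈ pvPassS m Q ↔ x ∈ pvCollect m := by
  have hQ : ∀ q ∈ Q, pvInB m q.1 q.2 := fun q hq => (hinv.1 q hq).1
  obtain ⟨hmem, hchar⟩ := pv_passS_char m Q hrect hQ
  intro x
  obtain ⟨a, b⟩ := x
  rw [hchar (a, b), pv_mem_collect]
  constructor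
  · rintro ⟨hneg, q, hqQ, hadj⟩
    have hqin : pvInB m q.1 q.2 := hQ q hqQ
    have hin : pvInB m a b := pv_adjL_InB m q.1 q.2 a b hrect hqin hadj
    refine ⟨hin, hneg, (pv_hasPos_char m a b hrect hin).mpr ⟨(q.1, q.2), ?_, ?_⟩⟩
    · exact (pv_adjL_symm m q.1 q.2 a b hrect hqin hin).mp hadj
    · exact (hinv.1 q hqQ).2
  · rintro ⟨hin, hneg, hpn⟩
    obtain ⟨p, hpadj, hppos⟩ := (pv_hasPos_char m a b hrect hin).mp hpn
    obtain ⟨q, hqQ, hqadj⟩ := hinv.2 a b hin hneg ⟨p, hpadj, hppos⟩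
    have hqin : pvInB m q.1 q.2 := hQ q hqQ
    refine ⟨hneg, q, hqQ, ?_⟩
    exact (pv_adjL_symm m q.1 q.2 a b hrect hqin hin).mpr (by simpa using hqadj)

-- ---- counting lemmas ----
theorem pv_countP_set_lt (row : List Int) (c : Nat) (w : Int)
    (hc : c < row.length) (hneg : row.getD c 0 < 0) (hw : 0 ≤ w) :
    (row.set c w).countP (fun v => decide (v < 0)) <
      row.countP (fun v => decide (v < 0)) := by
  induction row generalizing c with
  | nil => simp at hc
  | cons a row ih =>
    cases c with
    | zero =>
      simp only [List.getD_cons_zero] at hneg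
      simp only [List.set_cons_zero, List.countP_cons]
      simp [hneg, show ¬ w < 0 by omega]
    | succ c =>
      simp only [List.getD_cons_succ] at hneg
      simp only [List.set_cons_succ, List.countP_cons]
      have := ih c (by simpa using hc) hneg
      omega

theorem pv_map_sum_set_lt (m : List (List Int)) (r : Nat) (row' : List Int)
    (hr : r < m.length)
    (hlt : (row'.countP fun v => decide (v < 0)) <
      ((m.getD r []).countP fun v => decide (v < 0))) :
    ((m.set r row').map fun row => row.countP fun v => decide (v < 0)).sum <
      (m.map fun row => row.countP fun v => decide (v < 0)).sum := by
  induction m generalizing r with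
  | nil => simp at hr
  | cons hd tl ih =>
    cases r with
    | zero =>
      simp only [List.getD_cons_zero] at hlt
      simp only [List.set_cons_zero, List.map_cons, List.sum_cons]
      omega
    | succ r =>
      simp only [List.getD_cons_succ] at hlt
      simp only [List.set_cons_succ, List.map_cons, List.sum_cons]
      have := ih r (by simpa using hr) hlt
      omega

theorem pv_negCount_pos (m : List (List Int)) (r c : Nat)
    (hin : pvInB m r c) (hneg : pvGetCell m r c < 0) : 0 < pvNegCount m := by
  obtain ⟨hr, hc⟩ := hin
  unfold pvNegCount
  have hrowmem : m.getD r [] ∈ m := by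
    rw [List.getD_eq_getElem _ _ hr]
    exact List.getElem_mem hr
  have hcell : (m.getD r []).getD c 0 ∈ m.getD r [] := by
    rw [List.getD_eq_getElem _ _ hc]
    exact List.getElem_mem hc
  have hrow : 0 < (m.getD r []).countP fun v => decide (v < 0) :=
    List.countP_pos_iff.mpr ⟨_, hcell, by simpa using hneg⟩
  have hle : ((m.getD r []).countP fun v => decide (v < 0)) ≤
      (m.map fun row => row.countP fun v => decide (v < 0)).sum :=
    List.le_sum_of_mem (List.mem_map_of_mem hrowmem)
  omega

theorem pv_negCount_flip_lt (m : List (List Int)) (r c : Nat)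
    (hin : pvInB m r c) (hneg : pvGetCell m r c < 0) :
    pvNegCount (pvFlipCell m r c) < pvNegCount m := by
  obtain ⟨hr, hc⟩ := hin
  unfold pvNegCount pvFlipCell
  apply pv_map_sum_set_lt m r _ hr
  apply pv_countP_set_lt _ _ _ hc hneg
  have : pvGetCell m r c < 0 := hneg
  unfold pvGetCell at this
  omega

theorem pv_negCount_flipAll (m : List (List Int)) (S : List (Nat × Nat))
    (hS : pvMemInv m S) : pvNegCount (pvFlipAll m S) + S.length ≤ pvNegCount m := by
  induction S generalizing m with
  | nil => simp [pvFlipAll]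
  | cons p S ih =>
    obtain ⟨a, b⟩ := p
    obtain ⟨hp, hndS⟩ := List.nodup_cons.mp hS.1
    have hhead : pvInB m a b ∧ pvGetCell m a b < 0 := hS.2 (a, b) List.mem_cons_self
    have hS' : pvMemInv (pvFlipCell m a b) S := by
      refine ⟨hndS, fun q hq => ?_⟩
      have hq' := hS.2 q (List.mem_cons_of_mem _ hq)
      have hne : ¬(a = q.1 ∧ b = q.2) := by
        rintro ⟨h1, h2⟩
        exact hp (by rw [show q = (a, b) from Prod.ext h1.symm h2.symm] at hq; exact hq)
      constructor
      · unfold pvInB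
        rw [pv_length_flip, pv_rowlen_flip]
        exact hq'.1
      · rw [pv_getCell_flip_ne m a b q.1 q.2 hne]
        exact hq'.2
    have hstrict : pvNegCount (pvFlipCell m a b) < pvNegCount m :=
      pv_negCount_flip_lt m a b hhead.1 hhead.2
    have := ih (pvFlipCell m a b) hS'
    show pvNegCount (pvFlipAll (pvFlipCell m a b) S) + (S.length + 1) ≤ pvNegCount m
    omega

-- ---- invariant maintenance ----
theorem pv_rect_flipAll (m : List (List Int)) (S : List (Nat × Nat))
    (hrect : Pre_convertNegatives m) : Pre_convertNegatives (pvFlipAll m S) := by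
  intro row hrow
  obtain ⟨i, hi, rfl⟩ := List.getElem_of_mem hrow
  have hi' : i < m.length := by rwa [pv_length_flipAll] at hi
  calc (pvFlipAll m S)[i].length
      = ((pvFlipAll m S).getD i []).length := by rw [List.getD_eq_getElem _ _ hi]
    _ = (m.getD i []).length := pv_rowlen_flipAll m S i
    _ = (m.getD 0 []).length := pv_rect_rowlen m i hrect hi'
    _ = ((pvFlipAll m S).getD 0 []).length := (pv_rowlen_flipAll m S 0).symm

theorem pv_inv_init (m : List (List Int)) (hrect : Pre_convertNegatives m) :
    pvInv m (pvGetAllPositivePositions m) := by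
  constructor
  · intro q hq
    obtain ⟨a, b⟩ := q
    exact (pv_mem_allPos m a b).mp hq
  · intro r c hin hneg ⟨p, hp, hpos⟩
    obtain ⟨a, b⟩ := p
    have hpin : pvInB m a b := pv_adjL_InB m r c a b hrect hin hp
    exact ⟨(a, b), (pv_mem_allPos m a b).mpr ⟨hpin, hpos⟩, hp⟩

theorem pv_inv_next (m : List (List Int)) (Q : List (Nat × Nat))
    (hrect : Pre_convertNegatives m) (hinv : pvInv m Q) :
    pvInv (pvFlipAll m (pvPassS m Q)) (pvPassS m Q) := by
  have hQ : ∀ q ∈ Q, pvInB m q.1 q.2 := fun q hq => (hinv.1 q hq).1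
  obtain ⟨hmemS, hchar⟩ := pv_passS_char m Q hrect hQ
  have hset := pv_passS_eq_collect m Q hrect hinv
  have hInB : ∀ p ∈ pvPassS m Q, pvInB m p.1 p.2 := fun p hp => (hmemS.2 p hp).1
  have hgc : ∀ r c, pvGetCell (pvFlipAll m (pvPassS m Q)) r c =
      if (r, c) ∈ pvPassS m Q then -(pvGetCell m r c) else pvGetCell m r c :=
    fun r c => pv_getCell_flipAll m _ r c hmemS.1 hInB
  have hInB2 : ∀ r c, pvInB (pvFlipAll m (pvPassS m Q)) r c ↔ pvInB m r c := by
    intro r c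
    unfold pvInB
    rw [pv_length_flipAll, pv_rowlen_flipAll]
  constructor
  · intro q hq
    obtain ⟨a, b⟩ := q
    have hqm : pvInB m a b ∧ pvGetCell m a b < 0 := hmemS.2 (a, b) hq
    refine ⟨(hInB2 a b).mpr hqm.1, ?_⟩
    rw [hgc a b, if_pos hq]
    have := hqm.2
    omega
  · intro r c hin2 hneg2 ⟨p, hpadj2, hppos2⟩
    have hin : pvInB m r c := (hInB2 r c).mp hin2
    rw [pv_adjL_flipAll] at hpadj2
    have hxS : (r, c) ∉ pvPassS m Q := by
      intro hmem
      rw [hgc r c, if_pos hmem] at hneg2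
      have hmm : pvGetCell m r c < 0 := (hmemS.2 _ hmem).2
      omega
    have hneg : pvGetCell m r c < 0 := by
      rw [hgc r c, if_neg hxS] at hneg2
      exact hneg2
    by_cases hpS : p ∈ pvPassS m Q
    · exact ⟨p, hpS, by rwa [pv_adjL_flipAll]⟩
    · have hppos : 0 < pvGetCell m p.1 p.2 := by
        rw [hgc p.1 p.2] at hppos2
        rw [if_neg (by simpa using hpS)] at hppos2
        exact hppos2
      obtain ⟨a, b⟩ := p
      have hpin : pvInB m a b := pv_adjL_InB m r c a b hrect hin hpadj2
      have hcol : (r, c) ∈ pvCollect m := (pv_mem_collect m r c).mpr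
        ⟨hin, hneg, (pv_hasPos_char m r c hrect hin).mpr ⟨(a, b), hpadj2, hppos⟩⟩
      exact absurd ((hset (r, c)).mpr hcol) hxS

-- ---- main simulation ----
theorem pv_aloop_nil (fuel : Nat) (m : List (List Int)) (p : Int) :
    pvALoop fuel m [] p = p := by
  cases fuel <;> simp [pvALoop]

theorem pv_main (fuel : Nat) (m : List (List Int)) (Q : List (Nat × Nat)) (p : Int)
    (hrect : Pre_convertNegatives m) (hinv : pvInv m Q) (hfuel : pvNegCount m ≤ fuel) :
    pvALoop (fuel + 1) m Q p = pvBLoop fuel m p := by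
  induction fuel generalizing m Q p with
  | zero =>
    have hzero : pvNegCount m = 0 := Nat.le_zero.mp hfuel
    have hcol : pvCollect m = [] := by
      rw [List.eq_nil_iff_forall_not_mem]
      intro x hx
      obtain ⟨a, b⟩ := x
      obtain ⟨hin, hneg, _⟩ := (pv_mem_collect m a b).mp hx
      have := pv_negCount_pos m a b hin hneg
      omega
    have hset := pv_passS_eq_collect m Q hrect hinv
    have hps : pvPassS m Q = [] := by
      rw [List.eq_nil_iff_forall_not_mem]
      intro x hx
      rw [hset x, hcol] at hx
      simp at hx
    rw [show pvALoop (0 + 1) m Q p = if Q.isEmpty then p else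
        pvALoop 0 (pvPass m Q).1 (pvPass m Q).2.1
          (if (pvPass m Q).2.2 then p + 1 else p) from rfl]
    by_cases hQ : Q.isEmpty = true
    · rw [if_pos hQ]; rfl
    · rw [if_neg hQ, pv_pass_eq]
      dsimp only
      rw [hps]
      simp [pvALoop, pvBLoop]
  | succ f ih =>
    have hset := pv_passS_eq_collect m Q hrect hinv
    by_cases hQe : Q.isEmpty = true
    · have hQnil : Q = [] := List.isEmpty_iff.mp hQe
      have hcol : pvCollect m = [] := by
        rw [List.eq_nil_iff_forall_not_mem]
        intro x hx
        have hx' := (hset x).mpr hx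
        subst hQnil
        simp [pvPassS] at hx'
      rw [show pvALoop (f + 1 + 1) m Q p = if Q.isEmpty then p else
          pvALoop (f + 1) (pvPass m Q).1 (pvPass m Q).2.1
            (if (pvPass m Q).2.2 then p + 1 else p) from rfl,
        if_pos hQe,
        show pvBLoop (f + 1) m p = if (pvCollect m).isEmpty then p else
          pvBLoop f (pvFlipAll m (pvCollect m)) (p + 1) from rfl,
        hcol]
      rfl
    · by_cases hS : pvPassS m Q = []
      · have hcol : pvCollect m = [] := by
          rw [List.eq_nil_iff_forall_not_mem]
          intro x hx
          have hx' := (hset x).mpr hx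
          rw [hS] at hx'
          simp at hx'
        rw [show pvALoop (f + 1 + 1) m Q p = if Q.isEmpty then p else
            pvALoop (f + 1) (pvPass m Q).1 (pvPass m Q).2.1
              (if (pvPass m Q).2.2 then p + 1 else p) from rfl,
          if_neg hQe, pv_pass_eq]
        dsimp only
        rw [hS,
          show pvBLoop (f + 1) m p = if (pvCollect m).isEmpty then p else
            pvBLoop f (pvFlipAll m (pvCollect m)) (p + 1) from rfl,
          hcol]
        simp [pv_aloop_nil]
      · have hcolne : (pvCollect m).isEmpty = false := by
          obtain ⟨x, hx⟩ := List.exists_mem_of_ne_nil _ hS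
          have hxc := (hset x).mp hx
          cases hc : (pvCollect m).isEmpty
          · rfl
          · rw [List.isEmpty_iff.mp hc] at hxc
            simp at hxc
        have hQ : ∀ q ∈ Q, pvInB m q.1 q.2 := fun q hq => (hinv.1 q hq).1
        have hmemS : pvMemInv m (pvPassS m Q) := (pv_passS_char m Q hrect hQ).1
        have hmemC : pvMemInv m (pvCollect m) := by
          refine ⟨pv_collect_nodup m, fun x hx => ?_⟩
          obtain ⟨a, b⟩ := x
          have h := (pv_mem_collect m a b).mp hx
          exact ⟨h.1, h.2.1⟩
        have hflip : pvFlipAll m (pvPassS m Q) = pvFlipAll m (pvCollect m) :=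
          pv_flipAll_set_eq m _ _ hmemS hmemC hset
        have hrect2 := pv_rect_flipAll m (pvPassS m Q) hrect
        have hinv2 := pv_inv_next m Q hrect hinv
        have hcount := pv_negCount_flipAll m (pvPassS m Q) hmemS
        have hlen : (pvPassS m Q).length ≠ 0 := by
          intro h
          exact hS (List.length_eq_zero_iff.mp h)
        have hfuel2 : pvNegCount (pvFlipAll m (pvPassS m Q)) ≤ f := by omega
        have hA : pvALoop (f + 1 + 1) m Q p =
            pvALoop (f + 1) (pvFlipAll m (pvPassS m Q)) (pvPassS m Q) (p + 1) := by
          rw [show pvALoop (f + 1 + 1) m Q p = if Q.isEmpty then p else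
              pvALoop (f + 1) (pvPass m Q).1 (pvPass m Q).2.1
                (if (pvPass m Q).2.2 then p + 1 else p) from rfl,
            if_neg hQe, pv_pass_eq]
          dsimp only
          have hprog : (!(pvPassS m Q).isEmpty) = true := by
            simp [hS]
          rw [hprog]
          rfl
        have hB : pvBLoop (f + 1) m p = pvBLoop f (pvFlipAll m (pvCollect m)) (p + 1) := by
          rw [show pvBLoop (f + 1) m p = if (pvCollect m).isEmpty then p else
              pvBLoop f (pvFlipAll m (pvCollect m)) (p + 1) from rfl, hcolne]
          rfl
        rw [hA, hB, ← hflip]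
        exact ih (pvFlipAll m (pvPassS m Q)) (pvPassS m Q) (p + 1) hrect2 hinv2 hfuel2

-- ===== VERDICT (by name: the statement is the Claim_ definition above) =====
theorem convertNegatives_spec : Claim_equal_convertNegatives := by
  unfold Claim_equal_convertNegatives
  intro matrix _ hpre
  unfold Spec_convertNegatives convertNegatives convertNegatives_alt
  exact pv_main (pvNegCount matrix + 1) matrix _ 0 hpre (pv_inv_init matrix hpre)
    (by omega)
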